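-- pv_equiv track=rewrite | github.com/DeepFocuser/Algorithm_Study | programmers/graph_방의개수.py | solution
-- ===== SOURCE A (Python) =====
-- from collections import defaultdict
--
-- def solution(arrows):
--
--     answer = 0
--
--     # cross상황 대비
--     for_cross = 2
--
--     # 정점 저장
--     vertex = defaultdict(bool)
--
--     # 간선 저장 x->y , y->x 저장
--     edge = defaultdict(bool)
--
--     # 오른쪽이 +, 왼쪽이 -
--     # (x축, y축)
--     move = [(0,1), (1,1), (1,0), (1,-1),
--             (0,-1), (-1,-1), (-1,0), (-1,1)]
--     # 첫번째 정점 True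
--     x_init, y_init = 0, 0
--     vertex[(x_init, y_init)] = True
--     for arrow in arrows:
--         # 크로스 상황을 대비하기 위해 2칸씩 가기
--         for _ in range(for_cross):
--             x_position = x_init + move[arrow][0]
--             y_position = y_init + move[arrow][1]
--             if not vertex[(x_position, y_position)]: # 첫 방문
--                 vertex[(x_position, y_position)] = True
--             elif vertex[(x_position, y_position)]: # 또 방문했는데,
--                 # 지나온 경로가 아닌 경우, 방 생성
--                 if not edge[(x_init, y_init, x_position, y_position)] or \
--                 not edge[(x_position, y_position, x_init, y_init)]:
--                     answer+=1
--
--             edge[(x_init, y_init, x_position, y_position)] = True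
--             edge[(x_position, y_position, x_init, y_init)] = True
--
--             x_init, y_init = x_position, y_position
--
--     return answer
-- ===== SOURCE B (Python) =====
-- def solution(arrows):
--     # Staged graph algorithm: (1) expand the arrows into the explicit walk point list
--     # (two half-steps per arrow), (2) dedup vertices and normalized undirected edges,
--     # (3) union-find (with path compression) over the vertices along the walk's steps,
--     # (4) return the cyclomatic number E - V + C of the walk graph = its number of
--     # independent cycles = the room count.
--     move = [(0, 1), (1, 1), (1, 0), (1, -1),
--             (0, -1), (-1, -1), (-1, 0), (-1, 1)]
--     pts = [(0, 0)]
--     x, y = 0, 0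
--     for a in arrows:
--         dx, dy = move[a]
--         for _ in range(2):
--             x, y = x + dx, y + dy
--             pts.append((x, y))
--     steps = list(zip(pts, pts[1:]))
--     verts = list(dict.fromkeys(pts))
--     edges = list(dict.fromkeys((p, q) if p <= q else (q, p) for p, q in steps))
--
--     parent = {v: v for v in verts}
--
--     def find(v):
--         chain = []
--         while parent[v] != v:
--             chain.append(v)
--             v = parent[v]
--         for u in chain:
--             parent[u] = v
--         return v
--
--     for p, q in steps:
--         rp, rq = find(p), find(q)
--         if rp != rq:
--             parent[rp] = rq
--
--     components = sum(1 for v in verts if parent[v] == v)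
--     return len(edges) - len(verts) + components
-- ===== Notes on version B (the rewrite author's own statement) =====
-- stated objective: alternative
-- what changed: A counts rooms online during the walk with boolean default-dicts; B is a staged graph algorithm: it first materializes the walk's point list, then dedups vertices and normalized undirected edges, runs union-find over the vertices along the walk's steps, and returns the cyclomatic number len(edges) - len(verts) + components.
import Mathlib
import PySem

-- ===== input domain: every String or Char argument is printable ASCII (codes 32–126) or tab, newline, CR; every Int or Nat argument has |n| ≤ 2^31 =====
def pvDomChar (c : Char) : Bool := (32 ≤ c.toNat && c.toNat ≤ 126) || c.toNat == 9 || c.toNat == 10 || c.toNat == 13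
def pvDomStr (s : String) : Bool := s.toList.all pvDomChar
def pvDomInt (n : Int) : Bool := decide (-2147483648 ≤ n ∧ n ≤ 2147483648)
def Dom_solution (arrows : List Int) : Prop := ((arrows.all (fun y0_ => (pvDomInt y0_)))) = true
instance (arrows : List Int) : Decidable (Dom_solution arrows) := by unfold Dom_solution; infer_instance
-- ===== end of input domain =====

-- B replaces A's online room counting by a staged graph algorithm: materialize the walk's
-- point list, dedup vertices and undirected edges, run union-find (with path compression)
-- along the walk, and return the cyclomatic number E - V + C (objective: alternative).

-- ===== PORT A =====
-- Python dict keys (x, y, xp, yp) are modelled as the isomorphic pair of points ((x,y),(xp,yp));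
-- only key equality is ever used, so this is exact.
def moveA : List (Int × Int) :=
  [(0,1), (1,1), (1,0), (1,-1), (0,-1), (-1,-1), (-1,0), (-1,1)]

structure StA where
  answer : Int
  vertex : PySem.Dict (Int × Int) Bool
  edge : PySem.Dict ((Int × Int) × (Int × Int)) Bool
  x : Int
  y : Int

-- one iteration of the inner `for _ in range(for_cross)` body; the trailing edge
-- insertions and position update of the Python body are written in each branch
def stepA (d : Int × Int) (s : StA) : StA :=
  let xp := s.x + d.1
  let yp := s.y + d.2
  if ¬ (s.vertex.getD (xp, yp) false) then
    { answer := s.answer, vertex := s.vertex.insert (xp, yp) true,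
      edge := (s.edge.insert ((s.x, s.y), (xp, yp)) true).insert ((xp, yp), (s.x, s.y)) true,
      x := xp, y := yp }
  else if ¬ (s.edge.getD ((s.x, s.y), (xp, yp)) false)
          ∨ ¬ (s.edge.getD ((xp, yp), (s.x, s.y)) false) then
    { answer := s.answer + 1, vertex := s.vertex,
      edge := (s.edge.insert ((s.x, s.y), (xp, yp)) true).insert ((xp, yp), (s.x, s.y)) true,
      x := xp, y := yp }
  else
    { answer := s.answer, vertex := s.vertex,
      edge := (s.edge.insert ((s.x, s.y), (xp, yp)) true).insert ((xp, yp), (s.x, s.y)) true,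
      x := xp, y := yp }

def arrowA (s : StA) (arrow : Int) : StA :=
  match PySem.List.pyGet? moveA arrow with
  | none => s          -- Python raises IndexError here; excluded by Pre_solution
  | some d => stepA d (stepA d s)

def solution (arrows : List Int) : Int :=
  (arrows.foldl arrowA
    { answer := 0,
      vertex := PySem.Dict.empty.insert (0, 0) true,
      edge := PySem.Dict.empty,
      x := 0, y := 0 }).answer

-- ===== PORT B =====
def moveB : List (Int × Int) :=
  [(0,1), (1,1), (1,0), (1,-1), (0,-1), (-1,-1), (-1,0), (-1,1)]

-- Python tuple comparison p <= q, lexicographic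
def ptLe (p q : Int × Int) : Bool := p.1 < q.1 || (p.1 == q.1 && p.2 ≤ q.2)

def normEdge (p q : Int × Int) : (Int × Int) × (Int × Int) :=
  if ptLe p q then (p, q) else (q, p)

-- stage 1: the walk as an explicit point list; state (pts, x, y), pts.append per half-step
def walkStep (d : Int × Int) (s : List (Int × Int) × Int × Int) : List (Int × Int) × Int × Int :=
  let nx := s.2.1 + d.1
  let ny := s.2.2 + d.2
  (s.1 ++ [(nx, ny)], nx, ny)

def walkArrow (s : List (Int × Int) × Int × Int) (arrow : Int) : List (Int × Int) × Int × Int :=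
  match PySem.List.pyGet? moveB arrow with
  | none => s          -- Python raises IndexError here; excluded by Pre_solution
  | some d => walkStep d (walkStep d s)

-- find's while-loop: walk the parent chain to the root, collecting the visited nodes;
-- the fuel (the number of vertices) bounds the chain length on every admitted input
-- (the proofs below establish that it is never exhausted)
def ufChain (parent : PySem.Dict (Int × Int) (Int × Int)) :
    Nat → (Int × Int) → (Int × Int) × List (Int × Int)
  | 0, v => (v, [])
  | fuel+1, v =>
    let p := parent.getD v v        -- parent[v]; every lookup hits an existing key
    if p = v then (v, [])
    else
      let rc := ufChain parent fuel p
      (rc.1, v :: rc.2)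

-- `for u in chain: parent[u] = v` — path compression after the while-loop
def ufFind (fuel : Nat) (parent : PySem.Dict (Int × Int) (Int × Int)) (v : Int × Int) :
    (Int × Int) × PySem.Dict (Int × Int) (Int × Int) :=
  let rc := ufChain parent fuel v
  (rc.1, rc.2.foldl (fun d u => d.insert u rc.1) parent)

def ufUnion (fuel : Nat) (parent : PySem.Dict (Int × Int) (Int × Int))
    (e : (Int × Int) × (Int × Int)) : PySem.Dict (Int × Int) (Int × Int) :=
  let f1 := ufFind fuel parent e.1
  let f2 := ufFind fuel f1.2 e.2
  if f1.1 = f2.1 then f2.2 else f2.2.insert f1.1 f2.1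

def solution_alt (arrows : List Int) : Int :=
  let pts := (arrows.foldl walkArrow ([((0 : Int), (0 : Int))], 0, 0)).1
  let steps := pts.zip pts.tail
  let verts := PySem.List.dedup pts
  let edges := PySem.List.dedup (steps.map (fun s => normEdge s.1 s.2))
  let parent0 := verts.foldl (fun d v => d.insert v v) PySem.Dict.empty
  let parent := steps.foldl (ufUnion verts.length) parent0
  -- sum(1 for v in verts if parent[v] == v) is the countP below
  ((edges.length : Int) - (verts.length : Int)) + (verts.countP (fun v => parent.getD v v == v) : Int)

-- ===== PRECONDITION & SPEC =====
-- Pre_ excludes exactly the inputs on which Python raises IndexError (move[arrow] with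
-- arrow outside -8..7); on all other inputs A returns normally.
def Pre_solution (arrows : List Int) : Prop := ∀ a ∈ arrows, -8 ≤ a ∧ a < 8
instance (arrows : List Int) : Decidable (Pre_solution arrows) := by unfold Pre_solution; infer_instance

def pvWitness_solution : List Int := [6, 6, 6, 4, 4, 4, 2, 2, 2, 0]

def Spec_solution (arrows : List Int) (out : Int) : Prop := out = solution_alt arrows
instance (arrows : List Int) (out : Int) : Decidable (Spec_solution arrows out) := by unfold Spec_solution; infer_instance

-- ===== CLAIM (what is proved, stated in full; the proofs are below) =====
def Claim_equal_solution : Prop := ∀ (arrows : List Int), Dom_solution arrows → Pre_solution arrows → Spec_solution arrows (solution arrows)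

-- ===== LEMMAS AND PROOFS =====

lemma normEdge_cases (p q : Int × Int) : normEdge p q = (p, q) ∨ normEdge p q = (q, p) := by
  unfold normEdge; split_ifs <;> simp

lemma normEdge_symm (p q : Int × Int) : normEdge p q = normEdge q p := by
  obtain ⟨a, b⟩ := p; obtain ⟨c, d⟩ := q
  unfold normEdge ptLe
  split_ifs with h1 h2 h2 <;> simp_all <;> omega

lemma normEdge_eq (a b p q : Int × Int) (h : normEdge a b = normEdge p q) :
    (a = p ∧ b = q) ∨ (a = q ∧ b = p) := by
  rcases normEdge_cases a b with h1 | h1 <;> rcases normEdge_cases p q with h2 | h2 <;>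
    rw [h1, h2] at h <;> injection h with h3 h4 <;> tauto

-- === Stage A↔walk: A's online count equals E - V + 1 of the walk's vertex/edge sets ===
-- proof-only model of the walk keeping the two sets (not part of either port)
structure WSt where
  vs : PySem.Set (Int × Int)
  es : PySem.Set ((Int × Int) × (Int × Int))
  x : Int
  y : Int

def wstep (d : Int × Int) (s : WSt) : WSt :=
  let nx := s.x + d.1
  let ny := s.y + d.2
  { vs := PySem.Set.add s.vs (nx, ny),
    es := PySem.Set.add s.es (normEdge (s.x, s.y) (nx, ny)),
    x := nx, y := ny }

def warrow (s : WSt) (arrow : Int) : WSt :=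
  match PySem.List.pyGet? moveA arrow with
  | none => s
  | some d => wstep d (wstep d s)

-- the simulation invariant between A's state and the walk-set state
structure SimInv (sa : StA) (sb : WSt) : Prop where
  hx : sa.x = sb.x
  hy : sa.y = sb.y
  hans : sa.answer = (sb.es.length : Int) - (sb.vs.length : Int) + 1
  hv : ∀ p : Int × Int, sa.vertex.getD p false = true ↔ p ∈ sb.vs
  he : ∀ u v : Int × Int, sa.edge.getD (u, v) false = true ↔ normEdge u v ∈ sb.es
  hpos : (sb.x, sb.y) ∈ sb.vs
  hend : ∀ e ∈ sb.es, e.1 ∈ sb.vs ∧ e.2 ∈ sb.vs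

lemma len_add {α : Type} [BEq α] [LawfulBEq α] (s : PySem.Set α) (x : α) :
    (PySem.Set.add s x).length = if x ∈ s then s.length else s.length + 1 := by
  rw [PySem.Set.add_eq_ite]; split_ifs <;> simp

lemma he_step (ed : PySem.Dict ((Int × Int) × (Int × Int)) Bool)
    (es : PySem.Set ((Int × Int) × (Int × Int))) (p q : Int × Int)
    (h : ∀ u v : Int × Int, ed.getD (u, v) false = true ↔ normEdge u v ∈ es) :
    ∀ u v : Int × Int,
      ((ed.insert (p, q) true).insert (q, p) true).getD (u, v) false = true ↔
        normEdge u v ∈ PySem.Set.add es (normEdge p q) := by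
  intro u v
  by_cases h1 : (u, v) = ((q, p) : (Int × Int) × (Int × Int))
  · injection h1 with h1a h1b; subst h1a; subst h1b
    rw [PySem.Dict.getD_insert_self]
    exact ⟨fun _ => (PySem.Set.mem_add _ _ _).2 (Or.inr (normEdge_symm _ _)), fun _ => rfl⟩
  · rw [PySem.Dict.getD_insert_of_ne _ _ _ h1]
    by_cases h2 : (u, v) = ((p, q) : (Int × Int) × (Int × Int))
    · injection h2 with h2a h2b; subst h2a; subst h2b
      rw [PySem.Dict.getD_insert_self]
      exact ⟨fun _ => (PySem.Set.mem_add _ _ _).2 (Or.inr rfl), fun _ => rfl⟩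
    · rw [PySem.Dict.getD_insert_of_ne _ _ _ h2, h u v, PySem.Set.mem_add]
      constructor
      · exact Or.inl
      · rintro (h3 | h3)
        · exact h3
        · rcases normEdge_eq _ _ _ _ h3 with ⟨rfl, rfl⟩ | ⟨rfl, rfl⟩
          · exact absurd rfl h2
          · exact absurd rfl h1

lemma step_rel (d : Int × Int) (sa : StA) (sb : WSt) (h : SimInv sa sb) :
    SimInv (stepA d sa) (wstep d sb) := by
  obtain ⟨hx, hy, hans, hv, he, hpos, hend⟩ := h
  obtain ⟨ans, vd, ed, ax, ay⟩ := sa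
  obtain ⟨vs, es, bx, by'⟩ := sb
  simp only at hx hy hans hv he hpos hend
  subst hx; subst hy
  have hposmem : ((ax, ay) : Int × Int) ∈ vs := hpos
  have hB : wstep d ⟨vs, es, ax, ay⟩ =
      ⟨PySem.Set.add vs ((ax + d.1), (ay + d.2)), PySem.Set.add es (normEdge (ax, ay) ((ax + d.1), (ay + d.2))), (ax + d.1), (ay + d.2)⟩ := rfl
  have hnewend : ∀ e ∈ PySem.Set.add es (normEdge (ax, ay) ((ax + d.1), (ay + d.2))),
      e.1 ∈ PySem.Set.add vs ((ax + d.1), (ay + d.2)) ∧ e.2 ∈ PySem.Set.add vs ((ax + d.1), (ay + d.2)) := by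
    intro e hmem
    rcases (PySem.Set.mem_add _ _ _).1 hmem with hmem | hmem
    · obtain ⟨h1, h2⟩ := hend e hmem
      exact ⟨(PySem.Set.mem_add _ _ _).2 (Or.inl h1), (PySem.Set.mem_add _ _ _).2 (Or.inl h2)⟩
    · rcases normEdge_cases (ax, ay) ((ax + d.1), (ay + d.2)) with hc | hc <;> rw [hmem, hc] <;>
        exact ⟨(PySem.Set.mem_add _ _ _).2 (by simp [hposmem]),
               (PySem.Set.mem_add _ _ _).2 (by simp [hposmem])⟩
  have hposnew : (((ax + d.1), (ay + d.2)) : Int × Int) ∈ PySem.Set.add vs ((ax + d.1), (ay + d.2)) :=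
    (PySem.Set.mem_add _ _ _).2 (Or.inr rfl)
  have hestep := he_step ed es (ax, ay) ((ax + d.1), (ay + d.2)) he
  rw [hB]
  by_cases hnew : vd.getD ((ax + d.1), (ay + d.2)) false = true
  · -- revisited vertex
    have hvmem : (((ax + d.1), (ay + d.2)) : Int × Int) ∈ vs := (hv _).1 hnew
    have hvs_eq : PySem.Set.add vs ((ax + d.1), (ay + d.2)) = vs := PySem.Set.add_of_mem hvmem
    by_cases hedge : normEdge (ax, ay) ((ax + d.1), (ay + d.2)) ∈ es
    · -- edge already traversed: nothing counted, es unchanged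
      have hes_eq : PySem.Set.add es (normEdge (ax, ay) ((ax + d.1), (ay + d.2))) = es :=
        PySem.Set.add_of_mem hedge
      have hfwd : ed.getD ((ax, ay), ((ax + d.1), (ay + d.2))) false = true := (he _ _).2 hedge
      have hbwd : ed.getD (((ax + d.1), (ay + d.2)), (ax, ay)) false = true :=
        (he _ _).2 (by rw [normEdge_symm]; exact hedge)
      have hA : stepA d ⟨ans, vd, ed, ax, ay⟩ =
          ⟨ans, vd, (ed.insert ((ax, ay), ((ax + d.1), (ay + d.2))) true).insert (((ax + d.1), (ay + d.2)), (ax, ay)) true,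
           (ax + d.1), (ay + d.2)⟩ := by
        simp only [stepA]
        rw [if_neg (by simp [hnew]), if_neg (by simp [hfwd, hbwd])]
      rw [hA]
      exact ⟨rfl, rfl, by rw [hvs_eq, hes_eq]; exact hans,
             by rw [hvs_eq]; exact hv, by rw [hes_eq] at hestep ⊢; exact hestep,
             by rw [hvs_eq]; exact hvmem, by rw [hvs_eq, hes_eq] at hnewend ⊢; exact hnewend⟩
    · -- revisit via a new edge: a room closes, answer + 1 = (E + 1) - V + 1
      have hfwd : ¬ ed.getD ((ax, ay), ((ax + d.1), (ay + d.2))) false = true := fun hc => hedge ((he _ _).1 hc)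
      have hA : stepA d ⟨ans, vd, ed, ax, ay⟩ =
          ⟨ans + 1, vd, (ed.insert ((ax, ay), ((ax + d.1), (ay + d.2))) true).insert (((ax + d.1), (ay + d.2)), (ax, ay)) true,
           (ax + d.1), (ay + d.2)⟩ := by
        simp only [stepA]
        rw [if_neg (by simp [hnew]), if_pos (Or.inl hfwd)]
      rw [hA]
      refine ⟨rfl, rfl, ?_, by rw [hvs_eq]; exact hv, hestep,
              by rw [hvs_eq]; exact hvmem, hnewend⟩
      rw [len_add, len_add, if_pos hvmem, if_neg hedge]; push_cast; omega
  · -- first visit of ((ax + d.1), (ay + d.2)): the connecting edge is necessarily new too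
    have hvnot : (((ax + d.1), (ay + d.2)) : Int × Int) ∉ vs := fun hc => hnew ((hv _).2 hc)
    have hedge : normEdge (ax, ay) ((ax + d.1), (ay + d.2)) ∉ es := by
      intro hc
      rcases normEdge_cases (ax, ay) ((ax + d.1), (ay + d.2)) with h1 | h1
      · exact hvnot (by simpa [h1] using (hend _ hc).2)
      · exact hvnot (by simpa [h1] using (hend _ hc).1)
    have hA : stepA d ⟨ans, vd, ed, ax, ay⟩ =
        ⟨ans, vd.insert ((ax + d.1), (ay + d.2)) true,
         (ed.insert ((ax, ay), ((ax + d.1), (ay + d.2))) true).insert (((ax + d.1), (ay + d.2)), (ax, ay)) true, (ax + d.1), (ay + d.2)⟩ := by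
      simp only [stepA]
      rw [if_pos (by simp [hnew])]
    rw [hA]
    refine ⟨rfl, rfl, ?_, ?_, hestep, hposnew, hnewend⟩
    · rw [len_add, len_add, if_neg hvnot, if_neg hedge]; push_cast; omega
    · intro p
      by_cases hp : p = (((ax + d.1), (ay + d.2)) : Int × Int)
      · subst hp; rw [PySem.Dict.getD_insert_self]
        simp [hposnew]
      · rw [PySem.Dict.getD_insert_of_ne _ _ _ hp, hv, PySem.Set.mem_add]
        exact ⟨Or.inl, fun h => h.resolve_right hp⟩

lemma arrow_rel (a : Int) (sa : StA) (sb : WSt) (h : SimInv sa sb) :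
    SimInv (arrowA sa a) (warrow sb a) := by
  unfold arrowA warrow
  cases PySem.List.pyGet? moveA a with
  | none => exact h
  | some d => exact step_rel d _ _ (step_rel d _ _ h)

lemma fold_rel (arrows : List Int) (sa : StA) (sb : WSt) (h : SimInv sa sb) :
    SimInv (arrows.foldl arrowA sa) (arrows.foldl warrow sb) := by
  induction arrows generalizing sa sb with
  | nil => exact h
  | cons a rest ih => exact ih _ _ (arrow_rel a sa sb h)

lemma init_rel :
    SimInv { answer := 0, vertex := PySem.Dict.empty.insert (0, 0) true,
             edge := PySem.Dict.empty, x := 0, y := 0 }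
           { vs := PySem.Set.add PySem.Set.empty (0, 0), es := PySem.Set.empty,
             x := 0, y := 0 } := by
  refine ⟨rfl, rfl, by decide, ?_, ?_, by decide, ?_⟩
  · intro p
    by_cases hp : p = ((0, 0) : Int × Int)
    · subst hp; rw [PySem.Dict.getD_insert_self]
      simp [PySem.Set.add, PySem.Set.empty]
    · rw [PySem.Dict.getD_insert_of_ne _ _ _ hp]
      simp [PySem.Dict.getD, PySem.Dict.get?, PySem.Dict.empty, PySem.Set.add,
            PySem.Set.empty, hp]
  · intro u v
    simp [PySem.Dict.getD, PySem.Dict.get?, PySem.Dict.empty, PySem.Set.empty]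
  · intro e hmem
    simp [PySem.Set.empty] at hmem

-- === Stage walk↔pts: the walk-set state is the dedup of the explicit point list ===
def edgeList (l : List (Int × Int)) : List ((Int × Int) × (Int × Int)) :=
  (l.zip l.tail).map (fun s => normEdge s.1 s.2)

structure WRel (sw : WSt) (sp : List (Int × Int) × Int × Int) : Prop where
  hx : sp.2.1 = sw.x
  hy : sp.2.2 = sw.y
  hne : sp.1 ≠ []
  hhead : sp.1.head? = some (0, 0)
  hlast : sp.1.getLast? = some (sw.x, sw.y)
  hvs : sw.vs = PySem.Set.ofList sp.1
  hes : sw.es = PySem.Set.ofList (edgeList sp.1)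

lemma zip_tail_append (l : List (Int × Int)) (a b : Int × Int) (h : l.getLast? = some a) :
    ((l ++ [b]).zip (l ++ [b]).tail) = l.zip l.tail ++ [(a, b)] := by
  induction l generalizing a with
  | nil => simp at h
  | cons x l' ih =>
    cases l' with
    | nil => simp_all
    | cons y l'' =>
      have h' : (y :: l'').getLast? = some a := by
        rw [List.getLast?_cons_cons] at h; exact h
      have := ih a h'
      simp only [List.cons_append, List.zip_cons_cons, List.tail_cons] at this ⊢
      rw [this]

lemma edgeList_append (l : List (Int × Int)) (a b : Int × Int) (h : l.getLast? = some a) :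
    edgeList (l ++ [b]) = edgeList l ++ [normEdge a b] := by
  unfold edgeList
  rw [zip_tail_append l a b h, List.map_append]
  rfl

lemma wrel_step (d : Int × Int) (sw : WSt) (sp : List (Int × Int) × Int × Int)
    (h : WRel sw sp) : WRel (wstep d sw) (walkStep d sp) := by
  obtain ⟨hx, hy, hne, hhead, hlast, hvs, hes⟩ := h
  refine ⟨by simp [walkStep, wstep, hx], by simp [walkStep, wstep, hy], by simp [walkStep], ?_, ?_, ?_, ?_⟩
  · show (sp.1 ++ [_]).head? = some (0, 0)
    rw [List.head?_append]
    cases hh : sp.1.head? with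
    | none => rw [hh] at hhead; exact absurd hhead (by simp)
    | some z => rw [hh] at hhead; simp [hhead]
  · show (sp.1 ++ [_]).getLast? = some _
    rw [List.getLast?_concat]
    simp [wstep, hx, hy]
  · show PySem.Set.add sw.vs _ = PySem.Set.ofList (sp.1 ++ [_])
    rw [PySem.Set.ofList_append_singleton, hvs]
    simp [hx, hy]
  · show PySem.Set.add sw.es _ = PySem.Set.ofList (edgeList (sp.1 ++ [_]))
    rw [edgeList_append sp.1 (sw.x, sw.y) _ hlast, PySem.Set.ofList_append_singleton, hes]
    simp [hx, hy]

lemma wrel_arrow (a : Int) (sw : WSt) (sp : List (Int × Int) × Int × Int)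
    (h : WRel sw sp) : WRel (warrow sw a) (walkArrow sp a) := by
  unfold warrow walkArrow
  have hmv : moveB = moveA := rfl
  rw [hmv]
  cases PySem.List.pyGet? moveA a with
  | none => exact h
  | some d => exact wrel_step d _ _ (wrel_step d _ _ h)

lemma wrel_fold (arrows : List Int) (sw : WSt) (sp : List (Int × Int) × Int × Int)
    (h : WRel sw sp) : WRel (arrows.foldl warrow sw) (arrows.foldl walkArrow sp) := by
  induction arrows generalizing sw sp with
  | nil => exact h
  | cons a rest ih => exact ih _ _ (wrel_arrow a sw sp h)

lemma wrel_init :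
    WRel { vs := PySem.Set.add PySem.Set.empty (0, 0), es := PySem.Set.empty, x := 0, y := 0 }
         ([((0 : Int), (0 : Int))], 0, 0) := by
  refine ⟨rfl, rfl, by simp, rfl, rfl, by decide, by decide⟩

-- === Stage union-find: after unioning along the walk, exactly one root remains ===
def ChainTo (parent : PySem.Dict (Int × Int) (Int × Int)) (r : Int × Int) :
    Nat → (Int × Int) → Prop
  | 0, v => v = r
  | k+1, v => v ≠ r ∧ ChainTo parent r k (parent.getD v v)

structure UFInv (parent : PySem.Dict (Int × Int) (Int × Int)) (S : List (Int × Int))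
    (r : Int × Int) : Prop where
  hmem : r ∈ S
  hroot : parent.getD r r = r
  hclosed : ∀ v ∈ S, parent.getD v v ∈ S
  hchain : ∀ v ∈ S, ∃ k, k + 1 ≤ S.length ∧ ChainTo parent r k v
  hout : ∀ v, v ∉ S → parent.getD v v = v
  hnd : S.Nodup

lemma chainTo_fix (parent : PySem.Dict (Int × Int) (Int × Int)) (r v : Int × Int)
    (hv : parent.getD v v = v) : ∀ k, ChainTo parent r k v → v = r := by
  intro k
  induction k with
  | zero => exact id
  | succ k ih => rintro ⟨-, hc⟩; rw [hv] at hc; exact ih hc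

lemma ufChain_spec (parent : PySem.Dict (Int × Int) (Int × Int)) (r : Int × Int)
    (hroot : parent.getD r r = r) :
    ∀ (k : Nat) (v : Int × Int) (fuel : Nat), ChainTo parent r k v → k ≤ fuel →
      (ufChain parent fuel v).1 = r ∧ ∀ u ∈ (ufChain parent fuel v).2, parent.getD u u ≠ u := by
  intro k
  induction k with
  | zero =>
    intro v fuel hc _
    subst hc
    cases fuel with
    | zero => exact ⟨rfl, by simp [ufChain]⟩
    | succ m => simp [ufChain, hroot]
  | succ k ih =>
    intro v fuel hc hle
    obtain ⟨hne, hcrest⟩ := hc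
    have hpv : parent.getD v v ≠ v := by
      intro hfix
      exact hne (chainTo_fix parent r v hfix (k+1) ⟨hne, hcrest⟩)
    cases fuel with
    | zero => omega
    | succ m =>
      have hrec := ih (parent.getD v v) m hcrest (by omega)
      simp only [ufChain, if_neg hpv]
      refine ⟨hrec.1, ?_⟩
      intro u hu
      rcases List.mem_cons.1 hu with rfl | hu
      · exact hpv
      · exact hrec.2 u hu

lemma getD_foldl_insert_const (c : List (Int × Int))
    (d : PySem.Dict (Int × Int) (Int × Int)) (r w : Int × Int) :
    (c.foldl (fun d u => d.insert u r) d).getD w w = if w ∈ c then r else d.getD w w := by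
  induction c generalizing d with
  | nil => simp
  | cons u c' ih =>
    simp only [List.foldl_cons, ih (d.insert u r), List.mem_cons]
    by_cases h1 : w ∈ c'
    · rw [if_pos h1, if_pos (Or.inr h1)]
    · rw [if_neg h1]
      by_cases h2 : w = u
      · subst h2; rw [if_pos (Or.inl rfl), PySem.Dict.getD_insert_self]
      · rw [if_neg (by tauto), PySem.Dict.getD_insert_of_ne _ _ _ h2]

lemma chainTo_shrink (parent parent' : PySem.Dict (Int × Int) (Int × Int)) (r : Int × Int)
    (h : ∀ w, parent'.getD w w = parent.getD w w ∨ parent'.getD w w = r) :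
    ∀ (k : Nat) (v : Int × Int), ChainTo parent r k v → ∃ k' ≤ k, ChainTo parent' r k' v := by
  intro k
  induction k with
  | zero => intro v hc; exact ⟨0, le_refl _, hc⟩
  | succ k ih =>
    intro v hc
    obtain ⟨hne, hcrest⟩ := hc
    rcases h v with hw | hw
    · obtain ⟨k', hk', hc'⟩ := ih _ hcrest
      exact ⟨k' + 1, by omega, ⟨hne, by rw [hw]; exact hc'⟩⟩
    · exact ⟨1, by omega, ⟨hne, hw⟩⟩

lemma ufInv_upd (parent parent' : PySem.Dict (Int × Int) (Int × Int))
    (S : List (Int × Int)) (r : Int × Int) (h : UFInv parent S r)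
    (hU : ∀ w, parent'.getD w w = parent.getD w w ∨ (w ∈ S ∧ w ≠ r ∧ parent'.getD w w = r)) :
    UFInv parent' S r := by
  obtain ⟨hmem, hroot, hclosed, hchain, hout, hnd⟩ := h
  have hdisj : ∀ w, parent'.getD w w = parent.getD w w ∨ parent'.getD w w = r := by
    intro w; rcases hU w with h1 | ⟨-, -, h1⟩
    · exact Or.inl h1
    · exact Or.inr h1
  refine ⟨hmem, ?_, ?_, ?_, ?_, hnd⟩
  · rcases hU r with h1 | ⟨-, h1, -⟩
    · rw [h1]; exact hroot
    · exact absurd rfl h1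
  · intro v hv
    rcases hdisj v with h1 | h1 <;> rw [h1]
    · exact hclosed v hv
    · exact hmem
  · intro v hv
    obtain ⟨k, hk, hc⟩ := hchain v hv
    obtain ⟨k', hk', hc'⟩ := chainTo_shrink parent parent' r hdisj k v hc
    exact ⟨k', by omega, hc'⟩
  · intro v hv
    rcases hU v with h1 | ⟨h1, -, -⟩
    · rw [h1]; exact hout v hv
    · exact absurd h1 hv

lemma ufFind_spec (parent : PySem.Dict (Int × Int) (Int × Int)) (S : List (Int × Int))
    (r v : Int × Int) (fuel : Nat) (h : UFInv parent S r) (hv : v ∈ S)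
    (hfuel : S.length ≤ fuel) :
    (ufFind fuel parent v).1 = r ∧ UFInv (ufFind fuel parent v).2 S r := by
  obtain ⟨k, hk, hc⟩ := h.hchain v hv
  have hspec := ufChain_spec parent r h.hroot k v fuel hc (by omega)
  unfold ufFind
  refine ⟨hspec.1, ?_⟩
  apply ufInv_upd parent _ S r h
  intro w
  rw [getD_foldl_insert_const]
  by_cases hw : w ∈ (ufChain parent fuel v).2
  · rw [if_pos hw]
    have hne : parent.getD w w ≠ w := hspec.2 w hw
    have hwS : w ∈ S := by
      by_contra hns
      exact hne (h.hout w hns)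
    have hwr : w ≠ r := by
      rintro rfl
      exact hne h.hroot
    exact Or.inr ⟨hwS, hwr, hspec.1⟩
  · rw [if_neg hw]; exact Or.inl rfl

lemma ufFind_fix (parent : PySem.Dict (Int × Int) (Int × Int)) (v : Int × Int) (fuel : Nat)
    (hfix : parent.getD v v = v) : ufFind fuel parent v = (v, parent) := by
  cases fuel <;> simp [ufFind, ufChain, hfix]

lemma chainTo_extend (parent : PySem.Dict (Int × Int) (Int × Int)) (S : List (Int × Int))
    (r q : Int × Int) (hq : q ∉ S) (hcl : ∀ v ∈ S, parent.getD v v ∈ S) :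
    ∀ (k : Nat) (v : Int × Int), v ∈ S → ChainTo parent r k v →
      ChainTo (parent.insert r q) q (k+1) v := by
  intro k
  induction k with
  | zero =>
    intro v hv hc
    subst hc
    refine ⟨fun hvq => hq (hvq ▸ hv), ?_⟩
    show (parent.insert v q).getD v v = q
    rw [PySem.Dict.getD_insert_self]
  | succ k ih =>
    intro v hv hc
    obtain ⟨hne, hcrest⟩ := hc
    refine ⟨fun hvq => hq (hvq ▸ hv), ?_⟩
    rw [PySem.Dict.getD_insert_of_ne _ _ _ hne]
    exact ih (parent.getD v v) (hcl v hv) hcrest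

lemma ufUnion_eq (fuel : Nat) (parent : PySem.Dict (Int × Int) (Int × Int))
    (e : (Int × Int) × (Int × Int)) :
    ufUnion fuel parent e =
      (if (ufFind fuel parent e.1).1 = (ufFind fuel (ufFind fuel parent e.1).2 e.2).1
       then (ufFind fuel (ufFind fuel parent e.1).2 e.2).2
       else (ufFind fuel (ufFind fuel parent e.1).2 e.2).2.insert
              (ufFind fuel parent e.1).1 (ufFind fuel (ufFind fuel parent e.1).2 e.2).1) := rfl

lemma ufUnion_inv (parent : PySem.Dict (Int × Int) (Int × Int)) (S : List (Int × Int))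
    (r : Int × Int) (e : (Int × Int) × (Int × Int)) (fuel : Nat)
    (h : UFInv parent S r) (hp : e.1 ∈ S) (hfuel : S.length ≤ fuel) :
    ∃ r', UFInv (ufUnion fuel parent e) (PySem.Set.add S e.2) r' := by
  obtain ⟨hr1, h1⟩ := ufFind_spec parent S r e.1 fuel h hp hfuel
  rw [ufUnion_eq]
  by_cases hq : e.2 ∈ S
  · obtain ⟨hr2, h2⟩ := ufFind_spec (ufFind fuel parent e.1).2 S r e.2 fuel h1 hq hfuel
    rw [PySem.Set.add_of_mem hq]
    rw [hr1, hr2, if_pos rfl]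
    exact ⟨r, h2⟩
  · have hfix : (ufFind fuel parent e.1).2.getD e.2 e.2 = e.2 := h1.hout e.2 hq
    rw [ufFind_fix _ _ _ hfix]
    have hner : r ≠ e.2 := fun hc => hq (hc ▸ h.hmem)
    rw [hr1]
    simp only [if_neg hner]
    rw [PySem.Set.add_of_not_mem hq]
    set p1 := (ufFind fuel parent e.1).2 with hp1
    refine ⟨e.2, ?_, ?_, ?_, ?_, ?_, ?_⟩
    · exact List.mem_append_right _ (List.mem_singleton.2 rfl)
    · show (p1.insert r e.2).getD e.2 e.2 = e.2
      rw [PySem.Dict.getD_insert_of_ne _ _ _ (Ne.symm hner)]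
      exact hfix
    · intro v hv
      rcases List.mem_append.1 hv with hv | hv
      · by_cases hvr : v = r
        · subst hvr
          rw [PySem.Dict.getD_insert_self]
          exact List.mem_append_right _ (List.mem_singleton.2 rfl)
        · rw [PySem.Dict.getD_insert_of_ne _ _ _ hvr]
          exact List.mem_append_left _ (h1.hclosed v hv)
      · rw [List.mem_singleton.1 hv]
        rw [PySem.Dict.getD_insert_of_ne _ _ _ (Ne.symm hner), hfix]
        exact List.mem_append_right _ (List.mem_singleton.2 rfl)
    · intro v hv
      rcases List.mem_append.1 hv with hv | hv
      · obtain ⟨k, hk, hc⟩ := h1.hchain v hv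
        refine ⟨k + 1, ?_, chainTo_extend p1 S r e.2 hq h1.hclosed k v hv hc⟩
        rw [List.length_append, List.length_singleton]
        omega
      · rw [List.mem_singleton.1 hv]
        exact ⟨0, by simp, rfl⟩
    · intro v hv
      have hv1 : v ∉ S := fun hc => hv (List.mem_append_left _ hc)
      have hvr : v ≠ r := fun hc => hv1 (hc ▸ h.hmem)
      rw [PySem.Dict.getD_insert_of_ne _ _ _ hvr]
      exact h1.hout v hv1
    · exact List.Nodup.append h1.hnd (List.nodup_singleton _)
        (by intro x hx hx'; rw [List.mem_singleton.1 hx'] at hx; exact hq hx)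

lemma fold_union (V : List (Int × Int)) :
    ∀ (rest : List (Int × Int)) (p0 : Int × Int)
      (parent : PySem.Dict (Int × Int) (Int × Int)) (S : List (Int × Int)) (r : Int × Int),
      UFInv parent S r → p0 ∈ S → (∀ v ∈ S, v ∈ V) → (∀ v ∈ rest, v ∈ V) →
      ∃ r', UFInv (((p0 :: rest).zip rest).foldl (ufUnion V.length) parent)
              (rest.foldl PySem.Set.add S) r' := by
  intro rest
  induction rest with
  | nil =>
    intro p0 parent S r h _ _ _
    simp only [List.zip_nil_right, List.foldl_nil]
    exact ⟨r, h⟩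
  | cons q rest' ih =>
    intro p0 parent S r h hp0 hSV hrestV
    have hfuel : S.length ≤ V.length :=
      List.Subperm.length_le ((h.hnd.subperm) (fun x hx => hSV x hx))
    obtain ⟨r1, h1⟩ := ufUnion_inv parent S r (p0, q) V.length h hp0 hfuel
    simp only [List.zip_cons_cons, List.foldl_cons]
    refine ih q (ufUnion V.length parent (p0, q)) (PySem.Set.add S q) r1 h1 ?_ ?_ ?_
    · exact (PySem.Set.mem_add _ _ _).2 (Or.inr rfl)
    · intro v hv
      rcases (PySem.Set.mem_add _ _ _).1 hv with hv | rfl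
      · exact hSV v hv
      · exact hrestV v (List.mem_cons_self)
    · intro v hv
      exact hrestV v (List.mem_cons_of_mem _ hv)

lemma parent0_getD (l : List (Int × Int)) (d : PySem.Dict (Int × Int) (Int × Int))
    (hd : ∀ w, d.getD w w = w) :
    ∀ w, (l.foldl (fun d v => d.insert v v) d).getD w w = w := by
  induction l generalizing d with
  | nil => exact hd
  | cons v l' ih =>
    simp only [List.foldl_cons]
    apply ih
    intro w
    by_cases hw : w = v
    · subst hw; rw [PySem.Dict.getD_insert_self]
    · rw [PySem.Dict.getD_insert_of_ne _ _ _ hw]; exact hd w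

lemma ufInv_root_iff (parent : PySem.Dict (Int × Int) (Int × Int)) (S : List (Int × Int))
    (r : Int × Int) (h : UFInv parent S r) :
    ∀ v ∈ S, (parent.getD v v = v ↔ v = r) := by
  intro v hv
  constructor
  · intro hfix
    obtain ⟨k, -, hc⟩ := h.hchain v hv
    exact chainTo_fix parent r v hfix k hc
  · rintro rfl
    exact h.hroot

lemma components_one (tl pts : List (Int × Int))
    (hcons : pts = ((0:Int),(0:Int)) :: tl) :
    (PySem.List.dedup pts).countP (fun v =>
      ((pts.zip pts.tail).foldl (ufUnion (PySem.List.dedup pts).length)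
        ((PySem.List.dedup pts).foldl (fun d v => d.insert v v) PySem.Dict.empty)).getD v v == v) = 1 := by
  have hverts : PySem.List.dedup pts = PySem.Set.ofList pts := by simp
  have hS0 : tl.foldl PySem.Set.add [((0:Int),(0:Int))] = PySem.Set.ofList pts := by
    rw [PySem.Set.ofList_eq_foldl, hcons]; rfl
  have hg := parent0_getD (PySem.List.dedup pts) PySem.Dict.empty (by intro w; simp)
  have hinv0 : UFInv ((PySem.List.dedup pts).foldl (fun d v => d.insert v v) PySem.Dict.empty)
      [((0:Int),(0:Int))] ((0:Int),(0:Int)) := by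
    refine ⟨List.mem_singleton.2 rfl, hg _, ?_, ?_, ?_, List.nodup_singleton _⟩
    · intro v hv; rw [hg]; exact hv
    · intro v hv
      rw [List.mem_singleton] at hv
      exact ⟨0, by simp, hv⟩
    · intro v _; exact hg v
  obtain ⟨rF, hF⟩ := fold_union (PySem.List.dedup pts)
      tl ((0:Int),(0:Int))
      ((PySem.List.dedup pts).foldl (fun d v => d.insert v v) PySem.Dict.empty)
      [((0:Int),(0:Int))] ((0:Int),(0:Int)) hinv0
      (List.mem_singleton.2 rfl)
      (by intro v hv
          rw [List.mem_singleton] at hv; subst hv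
          rw [hverts, PySem.Set.mem_ofList, hcons]; exact List.mem_cons_self)
      (by intro v hv
          rw [hverts, PySem.Set.mem_ofList, hcons]; exact List.mem_cons_of_mem _ hv)
  have hzip : pts.zip pts.tail = (((0:Int),(0:Int)) :: tl).zip tl := by rw [hcons]; rfl
  rw [hS0, ← hverts, ← hzip] at hF
  have hF' := hF
  have hroot := ufInv_root_iff _ _ _ hF'
  have hcongr : ∀ v ∈ PySem.List.dedup pts,
      (((pts.zip pts.tail).foldl (ufUnion (PySem.List.dedup pts).length)
        ((PySem.List.dedup pts).foldl (fun d v => d.insert v v) PySem.Dict.empty)).getD v v == v)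
      = (v == rF) := by
    intro v hv
    have hiff := hroot v hv
    by_cases hc : ((pts.zip pts.tail).foldl (ufUnion (PySem.List.dedup pts).length)
        ((PySem.List.dedup pts).foldl (fun d v => d.insert v v) PySem.Dict.empty)).getD v v = v
    · have hvr := hiff.1 hc
      subst hvr
      exact (beq_iff_eq.mpr hc).trans (beq_self_eq_true v).symm
    · have hne : v ≠ rF := fun hr => hc (hiff.2 hr)
      exact (beq_eq_false_iff_ne.mpr hc).trans (beq_eq_false_iff_ne.mpr hne).symm
  rw [List.countP_congr (fun x hx => by rw [hcongr x hx])]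
  have hcc : (PySem.List.dedup pts).countP (fun v => v == rF) = (PySem.List.dedup pts).count rF := rfl
  rw [hcc]
  exact List.count_eq_one_of_mem (by rw [hverts]; exact PySem.Set.nodup_ofList pts) hF'.hmem

lemma solution_alt_eq (arrows : List Int) :
    solution_alt arrows =
      ((PySem.Set.ofList (edgeList (arrows.foldl walkArrow ([((0 : Int), (0 : Int))], 0, 0)).1)).length : Int)
      - ((PySem.Set.ofList (arrows.foldl walkArrow ([((0 : Int), (0 : Int))], 0, 0)).1).length : Int) + 1 := by
  have hW := wrel_fold arrows _ _ wrel_init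
  obtain ⟨p0, tl, hcons⟩ : ∃ p0 tl,
      (arrows.foldl walkArrow ([((0 : Int), (0 : Int))], 0, 0)).1 = p0 :: tl := by
    cases hc : (arrows.foldl walkArrow ([((0 : Int), (0 : Int))], 0, 0)).1 with
    | nil => exact absurd hc hW.hne
    | cons a b => exact ⟨a, b, rfl⟩
  have hp00 : p0 = ((0 : Int), (0 : Int)) := by
    have h := hW.hhead
    rw [hcons] at h
    simpa using h
  subst hp00
  have hcomp := components_one tl _ hcons
  show ((PySem.List.dedup (((arrows.foldl walkArrow ([((0 : Int), (0 : Int))], 0, 0)).1.zip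
          (arrows.foldl walkArrow ([((0 : Int), (0 : Int))], 0, 0)).1.tail).map
            (fun s => normEdge s.1 s.2))).length : Int)
      - ((PySem.List.dedup (arrows.foldl walkArrow ([((0 : Int), (0 : Int))], 0, 0)).1).length : Int)
      + (((PySem.List.dedup (arrows.foldl walkArrow ([((0 : Int), (0 : Int))], 0, 0)).1).countP (fun v =>
          (((arrows.foldl walkArrow ([((0 : Int), (0 : Int))], 0, 0)).1.zip
              (arrows.foldl walkArrow ([((0 : Int), (0 : Int))], 0, 0)).1.tail).foldl
            (ufUnion (PySem.List.dedup (arrows.foldl walkArrow ([((0 : Int), (0 : Int))], 0, 0)).1).length)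
            ((PySem.List.dedup (arrows.foldl walkArrow ([((0 : Int), (0 : Int))], 0, 0)).1).foldl
              (fun d v => d.insert v v) PySem.Dict.empty)).getD v v == v) : Nat) : Int)
      = _
  rw [hcomp]
  have hedge : ((arrows.foldl walkArrow ([((0 : Int), (0 : Int))], 0, 0)).1.zip
      (arrows.foldl walkArrow ([((0 : Int), (0 : Int))], 0, 0)).1.tail).map
        (fun s => normEdge s.1 s.2) = edgeList (arrows.foldl walkArrow ([((0 : Int), (0 : Int))], 0, 0)).1 := rfl
  rw [hedge]
  simp

-- ===== VERDICT (by name: the statement is the Claim_ definition above) =====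
theorem solution_spec : Claim_equal_solution := by
  intro arrows _ _
  unfold Spec_solution
  have hA := fold_rel arrows _ _ init_rel
  have hW := wrel_fold arrows _ _ wrel_init
  rw [solution_alt_eq arrows]
  unfold solution
  rw [hA.hans, hW.hvs, hW.hes]
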